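-- pv_equiv track=rewrite | github.com/ilrexho2011/Project-EULER-Possible-Solutions-Problems-701_to_800 | Exercise 750/Exercise 750.py | solve
-- ===== SOURCE A (Python) =====
-- INF = 10 ** 10
--
-- def card_positions(n: int) -> list[int]:
--     pos = [-1 for _ in range(n)]
--     x = 1
--     for i in range(n):
--         x = (x * 3) % (n + 1)
--         pos[x - 1] = i
--     return pos
--
-- def solve(n: int) -> int:
--     pos = card_positions(n)
--
--     dp = [[INF for _ in range(n + 1)] for _ in range(n + 1)]
--     # dp[l][r] = The cost to bundle the cards in the segment [l, r)
--
--     # Initial conditions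
--     for i in range(n + 1):
--         dp[i][i] = 0
--         if i < n:
--             dp[i][i + 1] = 0
--
--     # d = length of the segment
--     for d in range(2, n + 1):
--         for l in range(n - d + 1):
--             r = l + d
--             for i in range(l + 1, r):
--                 # Move the card l to the initial position of the card i
--                 # Here, cards in (l,i] must be bundled beforehand
--                 # After that, cards in [i,r) are bundled
--                 cost = dp[l + 1][i + 1] + dp[i][r] + abs(pos[l] - pos[i])
--                 dp[l][r] = min(dp[l][r], cost)
--     return dp[0][n]
-- ===== SOURCE B (Python) =====
-- INF = 10 ** 10
--
-- def card_positions(n: int) -> list[int]: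
--     pos = [-1 for _ in range(n)]
--     x = 1
--     for i in range(n):
--         x = (x * 3) % (n + 1)
--         pos[x - 1] = i
--     return pos
--
-- def solve(n: int) -> int:
--     pos = card_positions(n)
--     cache = [[None] * (n + 1) for _ in range(n + 1)]
--
--     def cost(l: int, r: int) -> int:
--         # cost to bundle the cards in the segment [l, r)
--         if r - l <= 1:
--             return 0
--         c = cache[l][r]
--         if c is not None:
--             return c
--         best = INF
--         for i in range(l + 1, r):
--             best = min(best, cost(l + 1, i + 1) + cost(i, r) + abs(pos[l] - pos[i]))
--         cache[l][r] = best
--         return best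
--
--     return cost(0, n)
-- ===== Notes on version B (the rewrite author's own statement) =====
-- stated objective: alternative
-- what changed: The bottom-up length-ordered DP table is replaced by a top-down recursive cost(l, r) memoized in a dict; same card_positions helper, same recurrence values.
import Mathlib
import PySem

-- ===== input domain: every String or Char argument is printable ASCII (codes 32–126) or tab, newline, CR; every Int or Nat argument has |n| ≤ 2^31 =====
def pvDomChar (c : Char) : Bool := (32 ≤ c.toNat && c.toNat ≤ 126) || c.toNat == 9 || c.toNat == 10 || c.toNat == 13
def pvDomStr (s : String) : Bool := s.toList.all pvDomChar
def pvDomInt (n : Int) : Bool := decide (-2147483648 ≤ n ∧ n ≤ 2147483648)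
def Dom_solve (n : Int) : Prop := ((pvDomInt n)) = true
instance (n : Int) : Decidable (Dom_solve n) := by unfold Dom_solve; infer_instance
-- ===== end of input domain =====

-- B replaces A's bottom-up length-ordered DP table by a top-down memoized recursion on the
-- interval (same recurrence, same card_positions helper); alternative decomposition, no speed claim.

-- ===== PORT A =====
def INF : Int := 10 ^ 10

-- pos = [-1]*n; x = 1; for i in range(n): x = (x*3) % (n+1); pos[x-1] = i
-- (n < 0 gives range(n) = [], matching List.range n.toNat = []; pySetD is exact here:
--  0 ≤ x ≤ n from mod (n+1), so index x-1 ∈ [-1, n-1] is in range for the list of length n)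
def card_positions (n : Int) : List Int :=
  ((List.range n.toNat).foldl
    (fun (st : Int × List Int) i =>
      let x := PySem.Int.mod (st.1 * 3) (n + 1)
      (x, PySem.List.pySetD st.2 (x - 1) (i : Int)))
    (1, List.replicate n.toNat (-1))).2

-- dp[i][j] read/write; dp is an Array of row Arrays (Python's list of lists; O(1) indexing).
-- All accesses in A are provably in range for 0 ≤ n, so getD/setIfInBounds are exact here.
def get2 (dp : Array (Array Int)) (i j : Nat) : Int := (dp.getD i #[]).getD j 0
def set2 (dp : Array (Array Int)) (i j : Nat) (v : Int) : Array (Array Int) :=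
  dp.setIfInBounds i ((dp.getD i #[]).setIfInBounds j v)

-- body of the initial-conditions loop: dp[i][i] = 0; if i < n: dp[i][i+1] = 0
def dpInitF (N : Nat) (dp : Array (Array Int)) (i : Nat) : Array (Array Int) :=
  let dp := set2 dp i i 0
  if i < N then set2 dp i (i + 1) 0 else dp

-- body of the innermost loop: cost = dp[l+1][i+1] + dp[i][r] + abs(pos[l]-pos[i]); dp[l][r] = min(dp[l][r], cost)
def dpInnerF (pos : Array Int) (l r : Nat) (dp : Array (Array Int)) (i : Nat) : Array (Array Int) :=
  let cost := get2 dp (l + 1) (i + 1) + get2 dp i r + |pos.getD l 0 - pos.getD i 0|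
  set2 dp l r (min (get2 dp l r) cost)

-- body of the middle loop over l: r = l + d; for i in range(l+1, r): …
def dpRowF (pos : Array Int) (d : Nat) (dp : Array (Array Int)) (l : Nat) : Array (Array Int) :=
  let r := l + d
  (List.range' (l + 1) (r - (l + 1))).foldl (dpInnerF pos l r) dp

def solve (n : Int) : Int :=
  let N := n.toNat
  let pos := (card_positions n).toArray
  let dp0 : Array (Array Int) := Array.replicate (N + 1) (Array.replicate (N + 1) INF)
  -- initial conditions
  let dp1 := (List.range (N + 1)).foldl (dpInitF N) dp0
  -- for d in range(2, n+1): for l in range(n-d+1): for i in range(l+1, r):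
  let dp2 := (List.range' 2 (N - 1)).foldl
    (fun dp d => (List.range (N - d + 1)).foldl (dpRowF pos d) dp) dp1
  get2 dp2 0 N

-- ===== PORT B =====
def card_positions_alt (n : Int) : List Int :=
  ((List.range n.toNat).foldl
    (fun (st : Int × List Int) i =>
      let x := PySem.Int.mod (st.1 * 3) (n + 1)
      (x, PySem.List.pySetD st.2 (x - 1) (i : Int)))
    (1, List.replicate n.toNat (-1))).2

-- cache[l][r] read/write (Python's 2-D list of Optional[int])
def getC (c : Array (Array (Option Int))) (l r : Nat) : Option Int := (c.getD l #[]).getD r none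
def setC (c : Array (Array (Option Int))) (l r : Nat) (v : Int) : Array (Array (Option Int)) :=
  c.setIfInBounds l ((c.getD l #[]).setIfInBounds r (some v))

-- def cost(l, r): top-down recursion, memoized in the cache table, threaded through the calls.
-- fuel is a standard totality device: any fuel ≥ r - l gives the Python recursion's value
def costB (pos : Array Int) : Nat → Nat → Nat → Array (Array (Option Int)) →
    Int × Array (Array (Option Int))
  | 0, _, _, c => (0, c)
  | fuel + 1, l, r, c =>
    if r ≤ l + 1 then (0, c)
    else
      match getC c l r with
      | some v => (v, c)
      | none =>
        let res := (List.range' (l + 1) (r - (l + 1))).foldl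
          (fun (bm : Int × Array (Array (Option Int))) i =>
            let s1 := costB pos fuel (l + 1) (i + 1) bm.2
            let s2 := costB pos fuel i r s1.2
            (min bm.1 (s1.1 + s2.1 + |pos.getD l 0 - pos.getD i 0|), s2.2))
          (INF, c)
        (res.1, setC res.2 l r res.1)

def solve_alt (n : Int) : Int :=
  let pos := (card_positions_alt n).toArray
  let cache : Array (Array (Option Int)) :=
    Array.replicate (n.toNat + 1) (Array.replicate (n.toNat + 1) none)
  (costB pos n.toNat 0 n.toNat cache).1

-- ===== PRECONDITION & SPEC =====
-- A raises IndexError for negative n: the dp table is then the empty list and indexing it fails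
def Pre_solve (n : Int) : Prop := 0 ≤ n
instance (n : Int) : Decidable (Pre_solve n) := by unfold Pre_solve; infer_instance
def pvWitness_solve : Int := 5

def Spec_solve (n : Int) (out : Int) : Prop := out = solve_alt n
instance (n : Int) (out : Int) : Decidable (Spec_solve n out) := by unfold Spec_solve; infer_instance

-- ===== CLAIM (what is proved, stated in full; the proofs are below) =====
def Claim_equal_solve : Prop := ∀ (n : Int), Dom_solve n → Pre_solve n → Spec_solve n (solve n)

-- ===== LEMMAS AND PROOFS =====

-- the common interval recurrence both programs compute (fuel-indexed; costSpec is the canonical value)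
def cS (pos : Array Int) : Nat → Nat → Nat → Int
  | 0, _, _ => 0
  | fuel + 1, l, r =>
    if r ≤ l + 1 then 0
    else (List.range' (l + 1) (r - (l + 1))).foldl
      (fun best i =>
        min best (cS pos fuel (l + 1) (i + 1) + cS pos fuel i r +
          |pos.getD l 0 - pos.getD i 0|)) INF

def costSpec (pos : Array Int) (l r : Nat) : Int := cS pos (r - l) l r

theorem cS_congr (pos : Array Int) : ∀ f1 : Nat, ∀ f2 l r : Nat,
    r - l ≤ f1 → r - l ≤ f2 → cS pos f1 l r = cS pos f2 l r := by
  intro f1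
  induction f1 with
  | zero =>
    intro f2 l r h1 h2
    cases f2 with
    | zero => rfl
    | succ f2 => simp only [cS, if_pos (by omega : r ≤ l + 1)]
  | succ f1 ih =>
    intro f2 l r h1 h2
    cases f2 with
    | zero => simp only [cS, if_pos (by omega : r ≤ l + 1)]
    | succ f2 =>
      by_cases hb : r ≤ l + 1
      · simp only [cS, if_pos hb]
      · simp only [cS, if_neg hb]
        apply PySem.List.foldl_congr_mem
        intro acc i hi
        have hm := List.mem_range'_1.mp hi
        rw [ih f2 (l + 1) (i + 1) (by omega) (by omega),
            ih f2 i r (by omega) (by omega)]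

theorem cS_eq_costSpec (pos : Array Int) (f l r : Nat) (h : r - l ≤ f) :
    cS pos f l r = costSpec pos l r :=
  cS_congr pos f (r - l) l r h (le_refl _)

theorem costSpec_base (pos : Array Int) (l r : Nat) (h : r ≤ l + 1) :
    costSpec pos l r = 0 := by
  show cS pos (r - l) l r = 0
  cases hd : r - l with
  | zero => rfl
  | succ f => simp only [cS, if_pos h]

theorem costSpec_step (pos : Array Int) (l r : Nat) (h : l + 2 ≤ r) :
    costSpec pos l r = (List.range' (l + 1) (r - (l + 1))).foldl
      (fun best i =>
        min best (costSpec pos (l + 1) (i + 1) + costSpec pos i r +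
          |pos.getD l 0 - pos.getD i 0|)) INF := by
  show cS pos (r - l) l r = _
  cases hd : r - l with
  | zero => omega
  | succ f =>
    simp only [cS, if_neg (by omega : ¬ r ≤ l + 1)]
    apply PySem.List.foldl_congr_mem
    intro acc i hi
    have hm := List.mem_range'_1.mp hi
    rw [cS_eq_costSpec pos f (l + 1) (i + 1) (by omega),
        cS_eq_costSpec pos f i r (by omega)]

-- ---------- B side: the memoized recursion computes costSpec ----------

theorem agetD_set_self {α : Type} (xs : Array α) (i : Nat) (v d : α) (h : i < xs.size) :
    (xs.setIfInBounds i v).getD i d = v := by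
  simp [Array.getD, Array.setIfInBounds, h]

theorem agetD_set_ne {α : Type} (xs : Array α) (i a : Nat) (v d : α) (h : a ≠ i) :
    (xs.setIfInBounds i v).getD a d = xs.getD a d := by
  by_cases hi : i < xs.size
  · simp only [Array.getD, Array.setIfInBounds, hi, reduceDIte, Array.size_set]
    split_ifs with ha
    · exact Array.getElem_set_ne hi ha (Ne.symm h)
    · rfl
  · simp [Array.setIfInBounds, hi]

theorem aset_oob {α : Type} (xs : Array α) (i : Nat) (v : α) (h : ¬ i < xs.size) :
    xs.setIfInBounds i v = xs := by
  simp [Array.setIfInBounds, h]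

theorem agetD_replicate {α : Type} (m i : Nat) (x d : α) :
    (Array.replicate m x).getD i d = if i < m then x else d := by
  by_cases hi : i < m
  · simp [Array.getD, hi]
  · simp [Array.getD, hi]

def CacheOK (pos : Array Int) (c : Array (Array (Option Int))) : Prop :=
  ∀ p q v, getC c p q = some v → v = costSpec pos p q

theorem getC_setC_cases (c : Array (Array (Option Int))) (l r a b : Nat) (v w : Int)
    (h : getC (setC c l r v) a b = some w) :
    (a = l ∧ b = r ∧ w = v) ∨ getC c a b = some w := by
  unfold getC setC at h
  unfold getC
  by_cases hal : a = l
  · subst hal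
    by_cases hcl : a < c.size
    · rw [agetD_set_self _ _ _ _ hcl] at h
      by_cases hbr : b = r
      · subst hbr
        by_cases hrr : b < (c.getD a #[]).size
        · rw [agetD_set_self _ _ _ _ hrr] at h
          exact Or.inl ⟨rfl, rfl, (Option.some.inj h).symm⟩
        · rw [aset_oob _ _ _ hrr] at h
          exact Or.inr h
      · rw [agetD_set_ne _ _ _ _ _ hbr] at h
        exact Or.inr h
    · rw [aset_oob _ _ _ hcl] at h
      exact Or.inr h
  · rw [agetD_set_ne _ _ _ _ _ hal] at h
    exact Or.inr h

theorem costB_go (pos : Array Int) : ∀ fuel : Nat, ∀ l r : Nat,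
    ∀ c : Array (Array (Option Int)), r - l ≤ fuel → CacheOK pos c →
    (costB pos fuel l r c).1 = costSpec pos l r ∧
      CacheOK pos (costB pos fuel l r c).2 := by
  intro fuel
  induction fuel with
  | zero =>
    intro l r c h hm
    exact ⟨(costSpec_base pos l r (by omega)).symm, hm⟩
  | succ fuel ih =>
    intro l r c h hm
    by_cases hb : r ≤ l + 1
    · simp only [costB, if_pos hb]
      exact ⟨(costSpec_base pos l r hb).symm, hm⟩
    · simp only [costB, if_neg hb]
      cases hg : getC c l r with
      | some v =>
        exact ⟨hm l r v hg, hm⟩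
      | none =>
        -- fold invariant
        have fold_ok : ∀ L : List Nat, (∀ i ∈ L, l + 1 ≤ i ∧ i < r) →
            ∀ b : Int, ∀ m : Array (Array (Option Int)), CacheOK pos m →
            (L.foldl
              (fun (bm : Int × Array (Array (Option Int))) i =>
                let s1 := costB pos fuel (l + 1) (i + 1) bm.2
                let s2 := costB pos fuel i r s1.2
                (min bm.1 (s1.1 + s2.1 + |pos.getD l 0 - pos.getD i 0|), s2.2))
              (b, m)).1 =
              L.foldl
                (fun best i =>
                  min best (costSpec pos (l + 1) (i + 1) + costSpec pos i r +
                    |pos.getD l 0 - pos.getD i 0|)) b ∧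
            CacheOK pos ((L.foldl
              (fun (bm : Int × Array (Array (Option Int))) i =>
                let s1 := costB pos fuel (l + 1) (i + 1) bm.2
                let s2 := costB pos fuel i r s1.2
                (min bm.1 (s1.1 + s2.1 + |pos.getD l 0 - pos.getD i 0|), s2.2))
              (b, m)).2) := by
          intro L
          induction L with
          | nil => intro _ b m hmOK; exact ⟨rfl, hmOK⟩
          | cons i L ihL =>
            intro hmem b m hmOK
            have hi := hmem i (List.mem_cons_self ..)
            have h1 := ih (l + 1) (i + 1) m (by omega) hmOK
            have h2 := ih i r (costB pos fuel (l + 1) (i + 1) m).2 (by omega) h1.2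
            simp only [List.foldl_cons]
            rw [h1.1, h2.1]
            exact ihL (fun j hj => hmem j (List.mem_cons_of_mem _ hj)) _ _ h2.2
        have hmemL : ∀ i ∈ List.range' (l + 1) (r - (l + 1)), l + 1 ≤ i ∧ i < r := by
          intro i hi; have := List.mem_range'_1.mp hi; omega
        have hres := fold_ok (List.range' (l + 1) (r - (l + 1))) hmemL INF c hm
        refine ⟨?_, ?_⟩
        · exact hres.1.trans (costSpec_step pos l r (by omega)).symm
        · intro p q v hv
          rcases getC_setC_cases _ l r p q _ v hv with ⟨hp, hq, hw⟩ | hold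
          · subst hp; subst hq; subst hw
            exact hres.1.trans (costSpec_step pos p q (by omega)).symm
          · exact hres.2 p q v hold

theorem solve_alt_eq (n : Int) :
    solve_alt n = costSpec ((card_positions n).toArray) 0 n.toNat := by
  have hcp : card_positions_alt n = card_positions n := rfl
  have hempty : CacheOK ((card_positions n).toArray)
      (Array.replicate (n.toNat + 1) (Array.replicate (n.toNat + 1) none)) := by
    intro p q v hv
    rw [getC, agetD_replicate] at hv
    split_ifs at hv
    · rw [agetD_replicate] at hv
      split_ifs at hv
    · simp [Array.getD] at hv
  have := costB_go ((card_positions n).toArray) n.toNat 0 n.toNat _ (by omega) hempty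
  unfold solve_alt
  rw [hcp]
  exact this.1

-- ---------- A side: the table reaches costSpec ----------

def Shape (N : Nat) (dp : Array (Array Int)) : Prop :=
  dp.size = N + 1 ∧ ∀ i, i ≤ N → (dp.getD i #[]).size = N + 1

theorem shape_set2 (N : Nat) (dp : Array (Array Int)) (i j : Nat) (v : Int)
    (hS : Shape N dp) : Shape N (set2 dp i j v) := by
  obtain ⟨h1, h2⟩ := hS
  refine ⟨by simp [set2, h1], ?_⟩
  intro a ha
  by_cases hai : a = i
  · subst hai
    by_cases hlt : a < dp.size
    · rw [set2, agetD_set_self dp a _ _ hlt, Array.size_setIfInBounds]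
      exact h2 a ha
    · omega
  · rw [set2, agetD_set_ne dp i a _ _ hai]
    exact h2 a ha

theorem get2_set2 (N : Nat) (dp : Array (Array Int)) (i j a b : Nat) (v : Int)
    (hS : Shape N dp) (hi : i ≤ N) (hj : j ≤ N) :
    get2 (set2 dp i j v) a b = if a = i ∧ b = j then v else get2 dp a b := by
  obtain ⟨h1, h2⟩ := hS
  by_cases hai : a = i
  · subst hai
    rw [set2, get2, agetD_set_self dp a _ _ (by omega)]
    by_cases hbj : b = j
    · subst hbj
      rw [agetD_set_self _ _ _ _ (by rw [h2 a hi]; omega)]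
      simp
    · rw [agetD_set_ne _ _ _ _ _ hbj, if_neg (by tauto), get2]
  · rw [set2, get2, agetD_set_ne dp i a _ _ hai, if_neg (by tauto), get2]

-- the expected table content once all lengths ≤ d have been processed
def tv (pos : Array Int) (d l r : Nat) : Int :=
  if r ≤ l + 1 then (if l ≤ r then 0 else INF)
  else if r ≤ l + d then costSpec pos l r else INF

theorem tv_eq_costSpec (pos : Array Int) (d a b : Nat) (h1 : a ≤ b) (h2 : b ≤ a + d) :
    tv pos d a b = costSpec pos a b := by
  unfold tv
  by_cases hb : b ≤ a + 1
  · rw [if_pos hb, if_pos h1, costSpec_base pos a b hb]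
  · rw [if_neg hb, if_pos h2]

def DpInv (pos : Array Int) (N d : Nat) (dp : Array (Array Int)) : Prop :=
  Shape N dp ∧ ∀ l r, l ≤ N → r ≤ N → get2 dp l r = tv pos d l r

def DpMid (pos : Array Int) (N d L : Nat) (dp : Array (Array Int)) : Prop :=
  Shape N dp ∧ ∀ l r, l ≤ N → r ≤ N →
    get2 dp l r = if r = l + d ∧ l < L then costSpec pos l r else tv pos (d - 1) l r

theorem dpInitF_eq (N : Nat) (dp : Array (Array Int)) (i : Nat) :
    dpInitF N dp i =
      if i < N then set2 (set2 dp i i 0) i (i + 1) 0 else set2 dp i i 0 := rfl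

theorem dpInnerF_eq (pos : Array Int) (l r : Nat) (dp : Array (Array Int)) (i : Nat) :
    dpInnerF pos l r dp i =
      set2 dp l r (min (get2 dp l r)
        (get2 dp (l + 1) (i + 1) + get2 dp i r + |pos.getD l 0 - pos.getD i 0|)) := rfl

theorem dpRowF_eq (pos : Array Int) (d : Nat) (dp : Array (Array Int)) (l : Nat) :
    dpRowF pos d dp l =
      (List.range' (l + 1) (l + d - (l + 1))).foldl (dpInnerF pos l (l + d)) dp := rfl

theorem dp_init_aux (N : Nat) : ∀ k, k ≤ N + 1 →
    Shape N ((List.range k).foldl (dpInitF N)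
      (Array.replicate (N + 1) (Array.replicate (N + 1) INF))) ∧
    ∀ l r, l ≤ N → r ≤ N →
      get2 ((List.range k).foldl (dpInitF N)
        (Array.replicate (N + 1) (Array.replicate (N + 1) INF))) l r =
      if l < k ∧ l ≤ r ∧ r ≤ l + 1 then 0 else INF := by
  intro k
  induction k with
  | zero =>
    intro _
    rw [List.range_zero, List.foldl_nil]
    constructor
    · refine ⟨by simp, ?_⟩
      intro i hi
      rw [agetD_replicate (N + 1) i _ #[], if_pos (by omega), Array.size_replicate]
    · intro l r hl hr
      rw [get2, agetD_replicate (N + 1) l _ #[], if_pos (by omega),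
        agetD_replicate (N + 1) r INF 0, if_pos (by omega), if_neg (by omega)]
  | succ k ih =>
    intro hk
    obtain ⟨ihS, ihV⟩ := ih (by omega)
    rw [List.range_succ, List.foldl_append, List.foldl_cons, List.foldl_nil, dpInitF_eq]
    have hkN : k ≤ N := by omega
    have hS1 := shape_set2 N _ k k 0 ihS
    by_cases hlt : k < N
    · rw [if_pos hlt]
      refine ⟨shape_set2 N _ k (k + 1) 0 hS1, ?_⟩
      intro l r hl hr
      rw [get2_set2 N _ k (k + 1) l r 0 hS1 hkN (by omega),
        get2_set2 N _ k k l r 0 ihS hkN hkN, ihV l r hl hr]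
      split_ifs <;> omega
    · rw [if_neg hlt]
      refine ⟨hS1, ?_⟩
      intro l r hl hr
      rw [get2_set2 N _ k k l r 0 ihS hkN hkN, ihV l r hl hr]
      split_ifs <;> omega

theorem dp_init_inv (pos : Array Int) (N : Nat) :
    DpInv pos N 1 ((List.range (N + 1)).foldl (dpInitF N)
      (Array.replicate (N + 1) (Array.replicate (N + 1) INF))) := by
  obtain ⟨hS, hV⟩ := dp_init_aux N (N + 1) (le_refl _)
  refine ⟨hS, ?_⟩
  intro l r hl hr
  rw [hV l r hl hr]
  unfold tv
  split_ifs <;> first | rfl | omega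

theorem inner_step (pos : Array Int) (N d L : Nat) (dp : Array (Array Int))
    (hd : 2 ≤ d) (hL : L + d ≤ N) (hM : DpMid pos N d L dp) :
    DpMid pos N d (L + 1)
      ((List.range' (L + 1) (L + d - (L + 1))).foldl (dpInnerF pos L (L + d)) dp) := by
  obtain ⟨hS, hV⟩ := hM
  have hLN : L ≤ N := by omega
  have aux : ∀ k, k ≤ d - 1 →
      Shape N ((List.range' (L + 1) k).foldl (dpInnerF pos L (L + d)) dp) ∧
      ∀ l' r', l' ≤ N → r' ≤ N →
        get2 ((List.range' (L + 1) k).foldl (dpInnerF pos L (L + d)) dp) l' r' =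
        if l' = L ∧ r' = L + d then
          (List.range' (L + 1) k).foldl
            (fun best i =>
              min best (costSpec pos (L + 1) (i + 1) + costSpec pos i (L + d) +
                |pos.getD L 0 - pos.getD i 0|)) INF
        else if r' = l' + d ∧ l' < L then costSpec pos l' r' else tv pos (d - 1) l' r' := by
    intro k
    induction k with
    | zero =>
      refine fun _ => ⟨by rw [List.range'_zero, List.foldl_nil]; exact hS, ?_⟩
      intro l' r' hl' hr'
      rw [List.range'_zero, List.foldl_nil, List.foldl_nil, hV l' r' hl' hr']
      by_cases hc : l' = L ∧ r' = L + d
      · rw [if_pos hc, if_neg (by omega)]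
        unfold tv
        rw [if_neg (by omega), if_neg (by omega)]
      · rw [if_neg hc]
    | succ k ih =>
      intro hk
      obtain ⟨ihS, ihV⟩ := ih (by omega)
      rw [List.range'_concat, Nat.one_mul, List.foldl_append, List.foldl_cons,
        List.foldl_nil, dpInnerF_eq]
      have hiN : L + 1 + k + 1 ≤ N := by omega
      constructor
      · exact shape_set2 N _ L (L + d) _ ihS
      · intro l' r' hl' hr'
        rw [get2_set2 N _ L (L + d) l' r' _ ihS hLN hL,
          ihV (L + 1) (L + 1 + k + 1) (by omega) hiN,
          if_neg (show ¬(L + 1 = L ∧ L + 1 + k + 1 = L + d) by omega),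
          if_neg (show ¬(L + 1 + k + 1 = L + 1 + d ∧ L + 1 < L) by omega),
          ihV (L + 1 + k) (L + d) (by omega) (by omega),
          if_neg (show ¬(L + 1 + k = L ∧ L + d = L + d) by omega),
          if_neg (show ¬(L + d = L + 1 + k + d ∧ L + 1 + k < L) by omega),
          ihV L (L + d) hLN hL, if_pos (show L = L ∧ L + d = L + d from ⟨rfl, rfl⟩),
          tv_eq_costSpec pos (d - 1) (L + 1) (L + 1 + k + 1) (by omega) (by omega),
          tv_eq_costSpec pos (d - 1) (L + 1 + k) (L + d) (by omega) (by omega)]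
        by_cases hc : l' = L ∧ r' = L + d
        · simp only [if_pos hc, List.foldl_append, List.foldl_cons, List.foldl_nil]
        · simp only [if_neg hc, ihV l' r' hl' hr']
  obtain ⟨hS', hV'⟩ := aux (L + d - (L + 1)) (by omega)
  refine ⟨hS', ?_⟩
  intro l' r' hl' hr'
  rw [hV' l' r' hl' hr']
  by_cases hc : l' = L ∧ r' = L + d
  · obtain ⟨h1, h2⟩ := hc
    subst h1; subst h2
    rw [if_pos ⟨rfl, rfl⟩, if_pos (by omega),
      costSpec_step pos l' (l' + d) (by omega)]
  · rw [if_neg hc]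
    by_cases hc2 : r' = l' + d ∧ l' < L + 1
    · have hl'L : l' < L := by
        rcases Nat.lt_succ_iff_lt_or_eq.mp hc2.2 with h | h
        · exact h
        · exact absurd ⟨h, by omega⟩ hc
      rw [if_pos hc2, if_pos ⟨hc2.1, hl'L⟩]
    · rw [if_neg hc2, if_neg (fun h => hc2 ⟨h.1, by omega⟩)]

theorem middle_step (pos : Array Int) (N d : Nat) (dp : Array (Array Int))
    (hd : 2 ≤ d) (hdN : d ≤ N) (hI : DpInv pos N (d - 1) dp) :
    DpInv pos N d ((List.range (N - d + 1)).foldl (dpRowF pos d) dp) := by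
  have aux : ∀ k, k ≤ N - d + 1 →
      DpMid pos N d k ((List.range k).foldl (dpRowF pos d) dp) := by
    intro k
    induction k with
    | zero =>
      intro _
      rw [List.range_zero, List.foldl_nil]
      obtain ⟨hS, hV⟩ := hI
      refine ⟨hS, ?_⟩
      intro l r hl hr
      rw [hV l r hl hr, if_neg (by omega)]
    | succ k ih =>
      intro hk
      rw [List.range_succ, List.foldl_append, List.foldl_cons, List.foldl_nil, dpRowF_eq]
      exact inner_step pos N d k _ hd (by omega) (ih (by omega))
  obtain ⟨hS, hV⟩ := aux (N - d + 1) (le_refl _)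
  refine ⟨hS, ?_⟩
  intro l r hl hr
  rw [hV l r hl hr]
  by_cases hc : r = l + d ∧ l < N - d + 1
  · rw [if_pos hc, tv_eq_costSpec pos d l r (by omega) (by omega)]
  · rw [if_neg hc]
    unfold tv
    split_ifs <;> first | rfl | omega

theorem dp_outer (pos : Array Int) (N : Nat) (dp : Array (Array Int))
    (h : DpInv pos N 1 dp) : ∀ j, j ≤ N - 1 →
    DpInv pos N (j + 1) ((List.range' 2 j).foldl
      (fun dp d => (List.range (N - d + 1)).foldl (dpRowF pos d) dp) dp) := by
  intro j
  induction j with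
  | zero => intro _; rw [List.range'_zero, List.foldl_nil]; exact h
  | succ j ih =>
    intro hj
    rw [List.range'_concat, Nat.one_mul, List.foldl_append, List.foldl_cons, List.foldl_nil]
    rw [(by omega : j + 1 + 1 = 2 + j)]
    exact middle_step pos N (2 + j) _ (by omega) (by omega)
      (by have := ih (by omega); rwa [(by omega : j + 1 = 2 + j - 1)] at this)

theorem solve_eq (n : Int) : solve n = costSpec ((card_positions n).toArray) 0 n.toNat := by
  simp only [solve]
  by_cases hN : 2 ≤ n.toNat
  · have h := dp_outer ((card_positions n).toArray) n.toNat _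
      (dp_init_inv ((card_positions n).toArray) n.toNat) (n.toNat - 1) (le_refl _)
    rw [(by omega : n.toNat - 1 + 1 = n.toNat)] at h
    rw [h.2 0 n.toNat (by omega) (le_refl _),
      tv_eq_costSpec ((card_positions n).toArray) n.toNat 0 n.toNat (by omega) (by omega)]
  · rw [(by omega : n.toNat - 1 = 0), List.range'_zero, List.foldl_nil]
    have h := dp_init_inv ((card_positions n).toArray) n.toNat
    rw [h.2 0 n.toNat (by omega) (le_refl _)]
    unfold tv
    rw [if_pos (by omega), if_pos (by omega), costSpec_base _ _ _ (by omega)]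

-- ===== VERDICT (by name: the statement is the Claim_ definition above) =====
theorem solve_spec : Claim_equal_solve := by
  intro n _ _
  unfold Spec_solve
  rw [solve_eq, solve_alt_eq]
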